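-- pv_equiv track=rewrite | github.com/adamamer20/beam-preventive-behavior-abm | empirical/scripts/modeling_plan.py | _expand_interaction_items
-- ===== SOURCE A (Python) =====
-- import itertools
--
-- _PEER_PROGRESSIVE_NORMS_NONVAX_IDX_TO_ITEMS: dict[str, tuple[str, ...]] = {
--     "family_progressive_norms_nonvax_idx": (
--         "family_climate_harm",
--         "family_lgbt_adoption_rights",
--         "family_immigration_tolerance",
--     ),
--     "friends_progressive_norms_nonvax_idx": (
--         "friends_climate_harm",
--         "friends_lgbt_adoption_rights",
--         "friends_immigration_tolerance",
--     ),
--     "colleagues_progressive_norms_nonvax_idx": (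
--         "colleagues_climate_harm",
--         "colleagues_lgbt_adoption_rights",
--         "colleagues_immigration_tolerance",
--     ),
-- }
--
-- def _expand_interaction_items(interaction: tuple[str, ...]) -> tuple[tuple[str, ...], ...]:
--     """Expand an interaction tuple by replacing any peer norm index with its items."""
--     options_per_term: list[tuple[str, ...]] = []
--     for term in interaction:
--         options_per_term.append(_PEER_PROGRESSIVE_NORMS_NONVAX_IDX_TO_ITEMS.get(term, (term,)))
--     expanded = [tuple(combo) for combo in itertools.product(*options_per_term)]
--     # Preserve order while dropping duplicates.
--     seen: set[tuple[str, ...]] = set()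
--     deduped: list[tuple[str, ...]] = []
--     for combo in expanded:
--         if combo not in seen:
--             seen.add(combo)
--             deduped.append(combo)
--     return tuple(deduped)
-- ===== SOURCE B (Python) =====
-- _PEER_PROGRESSIVE_NORMS_NONVAX_IDX_TO_ITEMS: dict[str, tuple[str, ...]] = {
--     "family_progressive_norms_nonvax_idx": (
--         "family_climate_harm",
--         "family_lgbt_adoption_rights",
--         "family_immigration_tolerance",
--     ),
--     "friends_progressive_norms_nonvax_idx": (
--         "friends_climate_harm",
--         "friends_lgbt_adoption_rights",
--         "friends_immigration_tolerance",
--     ),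
--     "colleagues_progressive_norms_nonvax_idx": (
--         "colleagues_climate_harm",
--         "colleagues_lgbt_adoption_rights",
--         "colleagues_immigration_tolerance",
--     ),
-- }
--
--
-- def _expand_interaction_items(interaction: tuple[str, ...]) -> tuple[tuple[str, ...], ...]:
--     """Expand an interaction tuple by replacing any peer norm index with its items."""
--     # Mixed-radix enumeration: every combination is the decoding of one index
--     # i in range(total) (last term = fastest digit, matching itertools.product's
--     # order); no product lists are ever built. Each option tuple is nonempty, so
--     # total >= 1 and the empty interaction decodes to the single empty combo.
--     opts = [_PEER_PROGRESSIVE_NORMS_NONVAX_IDX_TO_ITEMS.get(t, (t,)) for t in interaction]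
--     total = 1
--     for o in opts:
--         total = total * len(o)
--     combos = []
--     for i in range(total):
--         rem = i
--         digits = []
--         for o in reversed(opts):
--             digits.append(o[rem % len(o)])
--             rem = rem // len(o)
--         digits.reverse()
--         combos.append(tuple(digits))
--     return tuple(dict.fromkeys(combos))
-- ===== Notes on version B (the rewrite author's own statement) =====
-- stated objective: alternative
-- what changed: Replaces itertools.product (and the seen-set dedup loop) by a mixed-radix enumeration: it multiplies the option-tuple lengths into a total count and decodes each index i in range(total) into its combination by repeated divmod over the reversed radices (last term fastest, matching product order), then dedups with dict.fromkeys.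
import Mathlib
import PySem

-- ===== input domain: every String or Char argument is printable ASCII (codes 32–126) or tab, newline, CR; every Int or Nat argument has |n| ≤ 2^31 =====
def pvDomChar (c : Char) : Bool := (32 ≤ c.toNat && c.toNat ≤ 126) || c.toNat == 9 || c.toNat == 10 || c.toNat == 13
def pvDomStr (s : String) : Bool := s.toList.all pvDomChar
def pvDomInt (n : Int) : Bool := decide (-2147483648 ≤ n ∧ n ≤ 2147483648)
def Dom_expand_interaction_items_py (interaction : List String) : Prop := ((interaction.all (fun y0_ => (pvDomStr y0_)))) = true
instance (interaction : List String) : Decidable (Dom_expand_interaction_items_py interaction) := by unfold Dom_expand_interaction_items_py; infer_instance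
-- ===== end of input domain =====

-- B replaces itertools.product + the seen-set dedup loop by a mixed-radix enumeration:
-- each combination is decoded from one counter i in range(total) (last term = fastest
-- digit), then deduped with dict.fromkeys (objective: alternative, same cost).

-- the module-level constant _PEER_PROGRESSIVE_NORMS_NONVAX_IDX_TO_ITEMS (shared context of A and B)
def pvPeerDict : PySem.Dict String (List String) :=
  PySem.Dict.ofList
    [("family_progressive_norms_nonvax_idx",
        ["family_climate_harm", "family_lgbt_adoption_rights", "family_immigration_tolerance"]),
     ("friends_progressive_norms_nonvax_idx",
        ["friends_climate_harm", "friends_lgbt_adoption_rights", "friends_immigration_tolerance"]),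
     ("colleagues_progressive_norms_nonvax_idx",
        ["colleagues_climate_harm", "colleagues_lgbt_adoption_rights", "colleagues_immigration_tolerance"])]

-- ===== PORT A =====
-- itertools.product(*options_per_term): Python's documented recursive expansion, exact
def pvProduct : List (List String) → List (List String)
  | [] => [[]]
  | o :: rest => o.flatMap (fun x => (pvProduct rest).map (fun c => x :: c))

def expand_interaction_items_py (interaction : List String) : List (List String) :=
  -- for term in interaction: options_per_term.append(dict.get(term, (term,)))
  let options_per_term : List (List String) :=
    interaction.foldl (fun acc term => acc ++ [PySem.Dict.getD pvPeerDict term [term]]) []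
  let expanded := pvProduct options_per_term
  -- seen-set dedup loop, state (seen, deduped)
  (expanded.foldl
    (fun (st : PySem.Set (List String) × List (List String)) combo =>
      if PySem.Set.contains st.1 combo then st
      else (PySem.Set.add st.1 combo, st.2 ++ [combo]))
    (PySem.Set.empty, [])).2

-- ===== PORT B =====
def pvOpt (term : String) : List String := PySem.Dict.getD pvPeerDict term [term]

-- the inner 'for o in reversed(opts): digits.append(o[rem % len(o)]); rem //= len(o)'
def pvDecodeStep (st : Int × List String) (o : List String) : Int × List String :=
  (PySem.Int.floordiv st.1 (o.length : Int),
   st.2 ++ [(PySem.List.pyGet? o (PySem.Int.mod st.1 (o.length : Int))).getD ""])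
  -- o[rem % len(o)] always in range here (len ≥ 1); .getD "" only totalizes pyGet?

def expand_interaction_items_py_alt (interaction : List String) : List (List String) :=
  let opts := interaction.map pvOpt
  let total : Int := opts.foldl (fun t o => t * (o.length : Int)) 1
  let combos : List (List String) :=
    (PySem.List.pyRange 0 total 1).foldl
      (fun combos i =>
        let st := opts.reverse.foldl pvDecodeStep (i, [])
        combos ++ [st.2.reverse])
      []
  PySem.List.dedup combos

-- ===== PRECONDITION & SPEC =====
def Spec_expand_interaction_items_py (interaction : List String) (out : List (List String)) : Prop := out = expand_interaction_items_py_alt interaction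
instance (interaction : List String) (out : List (List String)) : Decidable (Spec_expand_interaction_items_py interaction out) := by unfold Spec_expand_interaction_items_py; infer_instance

-- ===== CLAIM (what is proved, stated in full; the proofs are below) =====
def Claim_equal_expand_interaction_items_py : Prop := ∀ (interaction : List String), Dom_expand_interaction_items_py interaction → Spec_expand_interaction_items_py interaction (expand_interaction_items_py interaction)

-- ===== LEMMAS AND PROOFS =====

-- product of the option-list lengths
def pvN (opts : List (List String)) : Nat := (opts.map List.length).prod

-- recursive specification of one mixed-radix decode (head digit slowest)
def pvDec : List (List String) → Nat → List String
  | [], _ => []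
  | o :: rest, j => o.getD (j / pvN rest) "" :: pvDec rest (j % pvN rest)

lemma pvOpt_ne_nil (t : String) : pvOpt t ≠ [] := by
  unfold pvOpt
  rw [PySem.Dict.getD_eq_get?_getD]
  cases hg : pvPeerDict.get? t with
  | none => simp
  | some v =>
      have hm := PySem.Dict.mem_items_of_get?_eq_some pvPeerDict hg
      simp only [show pvPeerDict.items =
          [("family_progressive_norms_nonvax_idx",
              ["family_climate_harm", "family_lgbt_adoption_rights", "family_immigration_tolerance"]),
           ("friends_progressive_norms_nonvax_idx",
              ["friends_climate_harm", "friends_lgbt_adoption_rights", "friends_immigration_tolerance"]),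
           ("colleagues_progressive_norms_nonvax_idx",
              ["colleagues_climate_harm", "colleagues_lgbt_adoption_rights", "colleagues_immigration_tolerance"])]
        from rfl, List.mem_cons, List.not_mem_nil, or_false, Prod.mk.injEq] at hm
      rcases hm with h | h | h <;> simp [h.2]

lemma pvN_pos (opts : List (List String)) (h : ∀ o ∈ opts, o ≠ []) : 0 < pvN opts := by
  induction opts with
  | nil => simp [pvN]
  | cons o rest ih =>
      have ho : o ≠ [] := h o (by simp)
      have : 0 < o.length := List.length_pos_iff.mpr ho
      have hr := ih (fun x hx => h x (by simp [hx]))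
      simp only [pvN, List.map_cons, List.prod_cons]
      exact Nat.mul_pos this (by simpa [pvN] using hr)

lemma pv_total_eq (opts : List (List String)) :
    ∀ c : Int, opts.foldl (fun t o => t * (o.length : Int)) c = c * (pvN opts : Nat) := by
  induction opts with
  | nil => intro c; simp [pvN]
  | cons o rest ih =>
      intro c
      simp only [List.foldl_cons, ih, pvN, List.map_cons, List.prod_cons]
      push_cast
      ring

-- the reversed fold computes quotient and the reversed decode of i mod pvN
lemma pv_decode_fold (opts : List (List String)) (h : ∀ o ∈ opts, o ≠ []) :
    ∀ (i : Nat) (acc : List String),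
      opts.reverse.foldl pvDecodeStep ((i : Int), acc)
        = (((i / pvN opts : Nat) : Int), acc ++ (pvDec opts (i % pvN opts)).reverse) := by
  induction opts with
  | nil => intro i acc; simp [pvN, pvDec]
  | cons o rest ih =>
      intro i acc
      have ho : o ≠ [] := h o (by simp)
      have hol : 0 < o.length := List.length_pos_iff.mpr ho
      have hNr : 0 < pvN rest := pvN_pos rest (fun x hx => h x (by simp [hx]))
      have hdigit : (i / pvN rest) % o.length < o.length := Nat.mod_lt _ hol
      rw [List.reverse_cons, List.foldl_append,
        ih (fun x hx => h x (by simp [hx])) i acc]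
      simp only [List.foldl_cons, List.foldl_nil, pvDecodeStep,
        PySem.Int.floordiv_natCast, PySem.Int.mod_natCast, PySem.List.pyGet?_natCast]
      have hN : pvN (o :: rest) = o.length * pvN rest := by
        simp [pvN]
      refine Prod.ext ?_ ?_
      · simp only [hN]
        norm_cast
        rw [Nat.div_div_eq_div_mul, Nat.mul_comm]
      · simp only [pvDec, hN, List.reverse_cons, ← List.append_assoc]
        congr 2
        · rw [Nat.mod_mod_of_dvd i ⟨o.length, Nat.mul_comm _ _⟩]
        · rw [List.getElem?_eq_getElem hdigit, Option.getD_some,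
            Nat.mul_comm o.length (pvN rest), Nat.mod_mul_right_div_self,
            List.getD_eq_getElem o "" hdigit]

lemma pv_range_mul (a b : Nat) :
    List.range (a * b) = (List.range a).flatMap (fun q => (List.range b).map (fun r => q * b + r)) := by
  induction a with
  | zero => simp
  | succ a ih =>
      rw [Nat.succ_mul, List.range_add, ih, List.range_succ, List.flatMap_append]
      simp [Nat.mul_comm]

-- flatMap over a list = flatMap over its index range
lemma pv_flatMap_range_getD {α β : Type} (g : α → List β) (d : α) :
    ∀ (l : List α),
      (List.range l.length).flatMap (fun q => g (l.getD q d)) = l.flatMap g := by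
  intro l
  induction l with
  | nil => simp
  | cons x xs ih =>
      simp only [List.length_cons, List.range_succ_eq_map, List.flatMap_cons, List.flatMap_map]
      exact congrArg (g x ++ ·) (by simpa [Function.comp_def] using ih)

-- decoding every index in range(pvN opts) enumerates exactly itertools.product
lemma pv_dec_range (opts : List (List String)) (h : ∀ o ∈ opts, o ≠ []) :
    (List.range (pvN opts)).map (pvDec opts) = pvProduct opts := by
  induction opts with
  | nil => simp [pvN, pvDec, pvProduct]
  | cons o rest ih =>
      have hNr : 0 < pvN rest := pvN_pos rest (fun x hx => h x (by simp [hx]))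
      have hN : pvN (o :: rest) = o.length * pvN rest := by simp [pvN]
      rw [hN, pv_range_mul, List.map_flatMap, pvProduct,
        ← pv_flatMap_range_getD (fun x => (pvProduct rest).map (fun c => x :: c)) "" o]
      apply List.flatMap_congr
      intro q _
      rw [← ih (fun x hx => h x (by simp [hx])), List.map_map, List.map_map]
      apply List.map_congr_left
      intro r hr
      have hrb : r < pvN rest := List.mem_range.mp hr
      have h1 : (q * pvN rest + r) / pvN rest = q := by
        rw [Nat.mul_comm, Nat.mul_add_div hNr, Nat.div_eq_of_lt hrb, Nat.add_zero]
      have h2 : (q * pvN rest + r) % pvN rest = r := by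
        rw [Nat.mul_comm, Nat.mul_add_mod, Nat.mod_eq_of_lt hrb]
      simp only [Function.comp_def, pvDec, h1, h2]

-- A's seen-set loop keeps seen = deduped, both built with Set.add.
lemma pv_dedup_loop :
    ∀ (xs : List (List String)) (s : PySem.Set (List String)),
      xs.foldl
        (fun (st : PySem.Set (List String) × List (List String)) combo =>
          if PySem.Set.contains st.1 combo then st
          else (PySem.Set.add st.1 combo, st.2 ++ [combo]))
        (s, s)
        = (xs.foldl PySem.Set.add s, xs.foldl PySem.Set.add s) := by
  intro xs
  induction xs with
  | nil => intro s; rfl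
  | cons x rest ih =>
      intro s
      simp only [List.foldl_cons]
      by_cases h : x ∈ s
      · rw [if_pos (by simpa [PySem.Set.contains_iff] using h), PySem.Set.add_of_mem h]
        exact ih s
      · rw [if_neg (by simpa [PySem.Set.contains_iff] using h),
          show s ++ [x] = PySem.Set.add s x from (PySem.Set.add_of_not_mem h).symm]
        exact ih _

-- ===== VERDICT (by name: the statement is the Claim_ definition above) =====
theorem expand_interaction_items_py_spec : Claim_equal_expand_interaction_items_py := by
  intro interaction _
  unfold Spec_expand_interaction_items_py expand_interaction_items_py expand_interaction_items_py_alt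
  simp only [PySem.List.foldl_append_singleton_eq_map]
  set opts := interaction.map pvOpt with hopts
  have hne : ∀ o ∈ opts, o ≠ [] := by
    intro o hoo
    obtain ⟨t, _, rfl⟩ := List.mem_map.mp hoo
    exact pvOpt_ne_nil t
  have hA : interaction.map (fun term => PySem.Dict.getD pvPeerDict term [term]) = opts := rfl
  rw [hA, pv_total_eq opts 1, one_mul, PySem.List.pyRange_zero_nat, List.map_map]
  have hmap : (List.range (pvN opts)).map
      ((fun i => ((opts.reverse.foldl pvDecodeStep (i, [])).2).reverse) ∘ (fun k : Nat => (k : Int)))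
      = pvProduct opts := by
    rw [← pv_dec_range opts hne]
    apply List.map_congr_left
    intro k hk
    simp only [Function.comp_def]
    rw [pv_decode_fold opts hne k [], Nat.mod_eq_of_lt (List.mem_range.mp hk)]
    simp
  rw [hmap,
    show (PySem.Set.empty : PySem.Set (List String)) = ([] : List (List String)) from rfl,
    pv_dedup_loop, show (PySem.List.dedup
      = fun (xs : List (List String)) => xs.foldl PySem.Set.add []) from rfl]
  simp
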